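-- pv_equiv track=rewrite | github.com/a-utkarsh/python-programs | Codersbit/non-nega.py | fragment
-- ===== SOURCE A (Python) =====
-- def fragment(a):
--     frag = []
--     temp = []
--
--     for x in a:
--         if(x > 0):
--
--             temp.append(x)
--         else:
--             if(len(temp) != 0):
--                 frag.append(temp)
--             temp = []
--     if(len(temp) != 0):
--         frag.append(temp)
--     return frag
-- ===== SOURCE B (Python) =====
-- def fragment(a):
--     res = []
--     i = 0
--     n = len(a)
--     while i < n:
--         if a[i] > 0:
--             j = i
--             while j < n and a[j] > 0:
--                 j += 1
--             res.append(a[i:j])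
--             i = j
--         else:
--             i += 1
--     return res
-- ===== Notes on version B (the rewrite author's own statement) =====
-- stated objective: alternative
-- what changed: Replaces A's temp-accumulator-and-flush loop with a two-pointer span scan: at each positive element the whole maximal positive run is located and sliced out in one step, so no partial-run state is carried or flushed.
import Mathlib
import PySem

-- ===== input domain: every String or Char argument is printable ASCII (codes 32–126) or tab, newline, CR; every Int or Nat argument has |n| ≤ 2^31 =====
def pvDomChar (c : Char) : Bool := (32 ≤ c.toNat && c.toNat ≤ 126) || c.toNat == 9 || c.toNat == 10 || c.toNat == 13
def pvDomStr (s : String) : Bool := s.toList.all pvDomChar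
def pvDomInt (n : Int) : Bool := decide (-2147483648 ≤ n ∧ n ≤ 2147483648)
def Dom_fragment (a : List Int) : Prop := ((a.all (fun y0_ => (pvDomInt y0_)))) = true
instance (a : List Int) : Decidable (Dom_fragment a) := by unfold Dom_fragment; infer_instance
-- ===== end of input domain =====

-- B replaces A's temp-accumulator-and-flush loop with a two-pointer span scan over maximal positive runs (alternative decomposition, same cost).


-- ===== PORT A =====
-- A's loop body: append x to temp if positive, else flush a non-empty temp into frag
def pvStep (s : List (List Int) × List Int) (x : Int) : List (List Int) × List Int :=
  if x > 0 then (s.1, s.2 ++ [x])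
  else (if s.2.length ≠ 0 then s.1 ++ [s.2] else s.1, [])

-- A's trailing 'if len(temp) != 0: frag.append(temp)'
def pvFlush (s : List (List Int) × List Int) : List (List Int) :=
  if s.2.length ≠ 0 then s.1 ++ [s.2] else s.1

-- literal port of A: fold carrying (frag, temp), then the final flush
def fragment (a : List Int) : List (List Int) :=
  pvFlush (a.foldl pvStep ([], []))

-- ===== PORT B =====
-- port of Source B's span scan: the inner while that advances j over the run is takeWhile/dropWhile,
-- the slice a[i:j] is that takeWhile; recursion resumes at j (or at i+1 on a non-positive head)
def fragment_alt (a : List Int) : List (List Int) :=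
  match a with
  | [] => []
  | x :: xs =>
    if x > 0 then
      (x :: xs.takeWhile (fun y => y > 0)) :: fragment_alt (xs.dropWhile (fun y => y > 0))
    else fragment_alt xs
termination_by a.length
decreasing_by
  · simpa using Nat.lt_succ_of_le (List.length_dropWhile_le _ _)
  · simp

-- ===== PRECONDITION & SPEC =====
def Spec_fragment (a : List Int) (out : List (List Int)) : Prop := out = fragment_alt a
instance (a : List Int) (out : List (List Int)) : Decidable (Spec_fragment a out) := by unfold Spec_fragment; infer_instance

-- ===== CLAIM (what is proved, stated in full; the proofs are below) =====
def Claim_equal_fragment : Prop := ∀ (a : List Int), Dom_fragment a → Spec_fragment a (fragment a)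

-- ===== LEMMAS AND PROOFS =====

-- the accumulated frag is a prefix of the final answer
theorem pvFold_frag (a : List Int) (frag : List (List Int)) (temp : List Int) :
    pvFlush (a.foldl pvStep (frag, temp)) = frag ++ pvFlush (a.foldl pvStep ([], temp)) := by
  induction a generalizing frag temp with
  | nil => simp only [List.foldl_nil, pvFlush]; split <;> simp
  | cons x xs ih =>
    simp only [List.foldl_cons, pvStep]
    by_cases hx : x > 0
    · simp only [hx, if_pos]
      rw [ih frag, ih []]
    · simp only [hx, if_false]
      rw [ih (if temp.length ≠ 0 then frag ++ [temp] else frag),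
          ih (if temp.length ≠ 0 then [] ++ [temp] else [])]
      split <;> simp

-- main invariant for A's loop started from state ([], temp)
theorem pvMain (a : List Int) :
    (pvFlush (a.foldl pvStep ([], [])) = fragment_alt a) ∧
    (∀ temp : List Int, temp ≠ [] →
      pvFlush (a.foldl pvStep ([], temp)) =
        (temp ++ a.takeWhile (fun y => y > 0)) :: fragment_alt (a.dropWhile (fun y => y > 0))) := by
  induction a with
  | nil =>
    refine ⟨by rw [fragment_alt.eq_def]; simp [pvFlush], ?_⟩
    intro temp ht
    rw [fragment_alt.eq_def]
    simp [pvFlush, List.length_eq_zero_iff, ht]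
  | cons x xs ih =>
    by_cases hx : x > 0
    · constructor
      · simp only [List.foldl_cons, pvStep, hx, if_pos, List.nil_append]
        rw [ih.2 [x] (by simp), fragment_alt]
        simp [hx]
      · intro temp ht
        simp only [List.foldl_cons, pvStep, hx, if_pos]
        rw [ih.2 (temp ++ [x]) (by simp)]
        simp [hx]
    · constructor
      · simp only [List.foldl_cons, pvStep, hx, if_false]
        simp only [List.length_nil, ne_eq, not_true_eq_false]
        rw [fragment_alt.eq_def]
        simp only [hx, if_false]
        simpa using ih.1
      · intro temp ht
        simp only [List.foldl_cons, pvStep, hx, if_false]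
        have hlen : temp.length ≠ 0 := by simpa [List.length_eq_zero_iff] using ht
        simp only [hlen, if_pos, ne_eq, not_false_eq_true]
        rw [pvFold_frag xs ([] ++ [temp]) [], ih.1]
        have he : fragment_alt (x :: xs) = fragment_alt xs := by
          rw [fragment_alt.eq_def]; simp [hx]
        simp [hx, he]

-- ===== VERDICT (by name: the statement is the Claim_ definition above) =====
theorem fragment_spec : Claim_equal_fragment := by
  intro a _
  show fragment a = fragment_alt a
  rw [fragment]
  exact (pvMain a).1
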